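-- pv_equiv track=rewrite | github.com/binaryhong/Algorithm | 프로그래머스/unrated/135808. 과일 장수/과일 장수.py | solution
-- ===== SOURCE A (Python) =====
-- def solution(k, m, score):
--     # k 사과의 최대 점수
--     # m  한 상자에 들어가는 사과의 수
--     # score 사과들의 점수
--     appleBox = []
--     new_score = []
--     sumValue = 0
--     score.sort(reverse=True)
--     for i in range(0, len(score)):
--         new_score.append(score[i])
--         if len(new_score) == m:
--             appleBox.append(new_score)
--             new_score = []
--     for i in range(0, len(appleBox)):
--         sumValue += min(appleBox[i]) * m
--     return sumValue
-- ===== SOURCE B (Python) =====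
-- def solution(k, m, score):
--     score.sort(reverse=True)
--     boxes = len(score) // m
--     return m * sum(score[q * m - 1] for q in range(1, boxes + 1))
-- ===== Notes on version B (the rewrite author's own statement) =====
-- stated objective: simpler
-- what changed: B builds no box lists and calls no min(): after sorting descending it computes the number of full boxes with integer division and sums the box minimums directly by index striding (score[q*m-1]), multiplying once by m.
-- outside the precondition, e.g. on solution(1, 0, [1]): A returns 0, B raises ZeroDivisionError
import Mathlib
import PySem

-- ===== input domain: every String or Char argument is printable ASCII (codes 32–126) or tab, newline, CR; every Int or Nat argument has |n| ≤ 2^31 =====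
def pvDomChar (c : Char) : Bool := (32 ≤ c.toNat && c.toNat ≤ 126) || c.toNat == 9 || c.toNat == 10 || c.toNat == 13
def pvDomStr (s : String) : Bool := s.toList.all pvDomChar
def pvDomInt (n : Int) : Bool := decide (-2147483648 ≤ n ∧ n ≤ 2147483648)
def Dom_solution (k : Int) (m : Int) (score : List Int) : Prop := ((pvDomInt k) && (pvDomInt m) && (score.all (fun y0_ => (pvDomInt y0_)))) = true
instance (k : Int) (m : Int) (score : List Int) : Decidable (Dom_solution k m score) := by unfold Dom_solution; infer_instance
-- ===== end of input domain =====

-- B replaces A's box-building + min() scan by direct index striding over the sorted list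
-- (objective: simpler). Both A and B sort `score` in place (same side effect); the
-- equivalence proved is about the return value.

-- ===== PORT A =====
def solution (k : Int) (m : Int) (score : List Int) : Int :=
  let s := PySem.List.sorted score (fun x => x) true
  let st := (PySem.List.pyRange 0 (s.length : Int)).foldl
    (fun (st : List (List Int) × List Int) i =>
      let ns := st.2 ++ [PySem.List.pyGetD s i 0]
      if (ns.length : Int) = m then (st.1 ++ [ns], ([] : List Int)) else (st.1, ns))
    ([], [])
  -- min(appleBox[i]): under Pre_ every appended box is nonempty, so min? is some; getD 0 never fires
  (PySem.List.pyRange 0 (st.1.length : Int)).foldl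
    (fun acc i =>
      acc + ((PySem.List.min? (PySem.List.pyGetD st.1 i []) (fun x => x)).getD 0) * m) 0

-- ===== PORT B =====
def solution_alt (k : Int) (m : Int) (score : List Int) : Int :=
  let s := PySem.List.sorted score (fun x => x) true
  let boxes := PySem.Int.floordiv (s.length : Int) m
  -- score[q*m-1]: under Pre_ (m ≠ 0) every such index is in range, so the default never fires
  m * (PySem.List.pyRange 1 (boxes + 1)).foldl
    (fun acc q => acc + PySem.List.pyGetD s (q * m - 1) 0) 0

-- ===== PRECONDITION & SPEC =====
-- Pre_ excludes only m = 0 (a meaningless box size): there A accidentally returns 0 while B raises ZeroDivisionError.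
def Pre_solution (k : Int) (m : Int) (score : List Int) : Prop := m ≠ 0
instance (k : Int) (m : Int) (score : List Int) : Decidable (Pre_solution k m score) := by unfold Pre_solution; infer_instance
def pvWitness_solution : Int × Int × List Int := (4, 3, [1, 2, 3, 1, 2, 3, 1])

def Spec_solution (k : Int) (m : Int) (score : List Int) (out : Int) : Prop := out = solution_alt k m score
instance (k : Int) (m : Int) (score : List Int) (out : Int) : Decidable (Spec_solution k m score out) := by unfold Spec_solution; infer_instance

-- ===== CLAIM (what is proved, stated in full; the proofs are below) =====
def Claim_equal_solution : Prop := ∀ (k : Int) (m : Int) (score : List Int), Dom_solution k m score → Pre_solution k m score → Spec_solution k m score (solution k m score)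

-- ===== LEMMAS AND PROOFS =====

-- A's first-loop body as a named function
def gA (m : Int) : List (List Int) × List Int → Int → List (List Int) × List Int :=
  fun st x =>
    let ns := st.2 ++ [x]
    if (ns.length : Int) = m then (st.1 ++ [ns], ([] : List Int)) else (st.1, ns)

-- chunks of size M (full chunks only), the shape of A's appleBox
def chunksF (M : Nat) (s : List Int) : List (List Int) :=
  if h : M = 0 ∨ s.length < M then [] else s.take M :: chunksF M (s.drop M)
termination_by s.length
decreasing_by
  simp only [not_or, not_lt] at h
  have hM : 1 ≤ M := Nat.one_le_iff_ne_zero.mpr h.1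
  simp [List.length_drop]; omega

-- with m < 0 the box-full test never fires
theorem foldA_neg {m : Int} (hm : m < 0) :
    ∀ (s : List Int) (bs : List (List Int)) (cur : List Int),
      (s.foldl (gA m) (bs, cur)).1 = bs := by
  intro s
  induction s with
  | nil => intro bs cur; rfl
  | cons x t ih =>
      intro bs cur
      simp only [List.foldl_cons, gA]
      have : ((cur ++ [x]).length : Int) ≠ m := by
        have : (0 : Int) ≤ ((cur ++ [x]).length : Int) := by positivity
        omega
      simp only [this, if_neg, not_false_iff]
      exact ih bs (cur ++ [x])

theorem foldA_under {m : Int} :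
    ∀ (c : List Int) (cur : List Int) (bs : List (List Int)),
      ((cur.length : Int) + c.length < m) →
      c.foldl (gA m) (bs, cur) = (bs, cur ++ c) := by
  intro c
  induction c with
  | nil => intro cur bs _; simp
  | cons x t ih =>
      intro cur bs h
      simp only [List.length_cons] at h
      push_cast at h
      have hl : (((cur ++ [x]).length : Int)) = (cur.length : Int) + 1 := by
        push_cast [List.length_append, List.length_cons, List.length_nil]; ring
      simp only [List.foldl_cons, gA]
      rw [if_neg (by omega : ¬ (((cur ++ [x]).length : Int)) = m)]
      rw [ih (cur ++ [x]) bs (by rw [hl]; omega)]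
      simp

theorem foldA_fill {m : Int} :
    ∀ (c : List Int) (cur : List Int) (bs : List (List Int)),
      c ≠ [] →
      ((cur.length : Int) + c.length = m) →
      c.foldl (gA m) (bs, cur) = (bs ++ [cur ++ c], []) := by
  intro c
  induction c with
  | nil => intro _ _ h; exact absurd rfl h
  | cons x t ih =>
      intro cur bs _ h
      simp only [List.length_cons] at h
      push_cast at h
      have hl : (((cur ++ [x]).length : Int)) = (cur.length : Int) + 1 := by
        push_cast [List.length_append, List.length_cons, List.length_nil]; ring
      simp only [List.foldl_cons, gA]
      cases t with
      | nil =>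
          simp only [List.length_nil] at h
          rw [if_pos (by omega : (((cur ++ [x]).length : Int)) = m)]
          simp
      | cons y t' =>
          rw [if_neg (by simp only [List.length_cons] at h ⊢; omega : ¬ (((cur ++ [x]).length : Int)) = m)]
          rw [ih (cur ++ [x]) bs (by simp)
            (by simp only [List.length_cons] at h ⊢; push_cast; rw [hl]; push_cast at h; omega)]
          simp

theorem foldA_chunks {m : Int} (hm : 1 ≤ m) :
    ∀ (n : Nat) (s : List Int), s.length = n → ∀ (bs : List (List Int)),
      (s.foldl (gA m) (bs, [])).1 = bs ++ chunksF m.toNat s := by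
  intro n
  induction n using Nat.strong_induction_on with
  | _ n ih =>
      intro s hn bs
      by_cases hlt : s.length < m.toNat
      · rw [foldA_under s [] bs (by simp only [List.length_nil, Nat.cast_zero, zero_add]; omega)]
        rw [chunksF]
        simp [hlt]
      · push_neg at hlt
        have hM1 : 1 ≤ m.toNat := by omega
        have hsplit : s = s.take m.toNat ++ s.drop m.toNat := (List.take_append_drop _ s).symm
        rw [chunksF]
        have hnot : ¬ (m.toNat = 0 ∨ s.length < m.toNat) := by push_neg; exact ⟨by omega, hlt⟩
        rw [dif_neg hnot]
        conv_lhs => rw [hsplit]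
        rw [List.foldl_append]
        have hl : (s.take m.toNat).length = m.toNat := by rw [List.length_take]; omega
        rw [foldA_fill (s.take m.toNat) [] bs
          (by apply List.ne_nil_of_length_pos; omega)
          (by simp only [List.length_nil, Nat.cast_zero, zero_add, hl]; omega)]
        have hdlen : (s.drop m.toNat).length = n - m.toNat := by simp [hn]
        rw [ih (n - m.toNat) (by omega) (s.drop m.toNat) hdlen (bs ++ [[] ++ s.take m.toNat])]
        simp

-- every chunk has length M and is a sublist of s
theorem chunksF_props {M : Nat} (hM : 1 ≤ M) :
    ∀ (n : Nat) (s : List Int), s.length = n →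
      ∀ b ∈ chunksF M s, b.length = M ∧ b.Sublist s := by
  intro n
  induction n using Nat.strong_induction_on with
  | _ n ih =>
      intro s hn b hb
      by_cases hc : M = 0 ∨ s.length < M
      · rw [chunksF, dif_pos hc] at hb; cases hb
      · rw [chunksF, dif_neg hc] at hb
        push_neg at hc
        rcases List.mem_cons.mp hb with hb | hb
        · subst hb
          exact ⟨by simp; omega, List.take_sublist _ _⟩
        · have hdlen : (s.drop M).length = n - M := by simp [hn]
          obtain ⟨h1, h2⟩ := ih (n - M) (by omega) (s.drop M) hdlen b hb
          exact ⟨h1, h2.trans (List.drop_sublist _ _)⟩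

-- min of a nonincreasing nonempty list is its last element
theorem foldl_min_desc :
    ∀ (t : List Int) (x : Int), (x :: t).Pairwise (fun a b => b ≤ a) →
      t.foldl min x = (x :: t).getLastD 0 := by
  intro t
  induction t with
  | nil => intro x _; simp
  | cons y t' ih =>
      intro x hp
      have hxy : y ≤ x := (List.pairwise_cons.mp hp).1 y (by simp)
      have hp' : (y :: t').Pairwise (fun a b => b ≤ a) := (List.pairwise_cons.mp hp).2
      simp only [List.foldl_cons, min_eq_right hxy]
      rw [ih y hp']
      simp

theorem minD_desc (l : List Int) (hne : l ≠ []) (hp : l.Pairwise (fun a b => b ≤ a)) :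
    (PySem.List.min? l (fun y => y)).getD 0 = l.getLastD 0 := by
  cases l with
  | nil => exact absurd rfl hne
  | cons x t =>
      rw [PySem.List.min?_id_cons]
      simp only [Option.getD_some]
      exact foldl_min_desc t x hp

-- index shift through drop
theorem pyGetD_drop (s : List Int) (M : Nat) (i : Int) (d : Int) (hi : 0 ≤ i) :
    PySem.List.pyGetD s (i + (M : Int)) d = PySem.List.pyGetD (s.drop M) i d := by
  rw [PySem.List.pyGetD_of_nonneg s d (by omega), PySem.List.pyGetD_of_nonneg _ d hi]
  have : (i + (M : Int)).toNat = M + i.toNat := by omega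
  rw [this]
  rcases Nat.lt_or_ge i.toNat (s.drop M).length with h | h
  · have h2 : M + i.toNat < s.length := by simp at h; omega
    rw [List.getD_eq_getElem _ _ h2, List.getD_eq_getElem _ _ h]
    simp [List.getElem_drop]
  · have h2 : s.length ≤ M + i.toNat := by simp at h; omega
    rw [List.getD_eq_default _ _ h2, List.getD_eq_default _ _ h]

-- shift a unit-step range by one
theorem pyRange_map_shift (a b : Int) (f : Int → Int) :
    (PySem.List.pyRange (a + 1) (b + 1)).map f = (PySem.List.pyRange a b).map (fun q => f (q + 1)) := by
  rw [PySem.List.pyRange_one, PySem.List.pyRange_one]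
  have : (b + 1 - (a + 1)).toNat = (b - a).toNat := by omega
  rw [this, List.map_map, List.map_map]
  apply List.map_congr_left
  intro k _
  simp only [Function.comp_apply]
  ring_nf

-- getLastD of a take as an indexed element
theorem getLastD_take (s : List Int) (M : Nat) (hM : 1 ≤ M) (h : M ≤ s.length) :
    (s.take M).getLastD 0 = s.getD (M - 1) 0 := by
  have hlen : (s.take M).length = M := by simp; omega
  rw [List.getLastD_eq_getLast?, List.getLast?_eq_getElem?, List.getD_eq_getElem?_getD, hlen]
  rw [List.getElem?_take_of_lt (by omega)]

-- B's sum equals the sum of last elements of the full chunks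
theorem bsum_chunks {m : Int} (hm : 1 ≤ m) :
    ∀ (n : Nat) (s : List Int), s.length = n →
      ((PySem.List.pyRange 1 (PySem.Int.floordiv (s.length : Int) m + 1)).map
        (fun q => PySem.List.pyGetD s (q * m - 1) 0)).sum
      = ((chunksF m.toNat s).map (fun b => b.getLastD 0)).sum := by
  intro n
  induction n using Nat.strong_induction_on with
  | _ n ih =>
      intro s hn
      by_cases hlt : s.length < m.toNat
      · have hfd : PySem.Int.floordiv (s.length : Int) m = 0 := by
          rw [PySem.Int.floordiv_eq_iff_of_pos (by omega : (0:Int) < m)]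
          exact ⟨by simp, by omega⟩
        rw [hfd]
        rw [PySem.List.pyRange_one_eq_nil (by omega)]
        rw [chunksF]
        simp [hlt]
      · push_neg at hlt
        have hM1 : 1 ≤ m.toNat := by omega
        have hmem : (m.toNat : Int) = m := by omega
        have hlen : (m : Int) ≤ (s.length : Int) := by omega
        -- floordiv recurrence
        have hfd : PySem.Int.floordiv (s.length : Int) m
            = PySem.Int.floordiv ((s.drop m.toNat).length : Int) m + 1 := by
          have hdl : ((s.drop m.toNat).length : Int) = (s.length : Int) - m := by
            simp [List.length_drop]; omega
          rw [hdl]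
          have h1 := PySem.Int.floordiv_mul_add_mod ((s.length : Int) - m) m
          have h2 := PySem.Int.mod_nonneg ((s.length : Int) - m) (by omega : (0:Int) < m)
          have h3 := PySem.Int.mod_lt ((s.length : Int) - m) (by omega : (0:Int) < m)
          rw [PySem.Int.floordiv_eq_iff_of_pos (by omega)]
          constructor <;> nlinarith
        rw [hfd]
        have hpos : (1 : Int) < PySem.Int.floordiv ((s.drop m.toNat).length : Int) m + 1 + 1 := by
          have h1 := PySem.Int.floordiv_mul_add_mod ((s.drop m.toNat).length : Int) m
          have h2 := PySem.Int.mod_nonneg ((s.drop m.toNat).length : Int) (by omega : (0:Int) < m)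
          have h3 := PySem.Int.mod_lt ((s.drop m.toNat).length : Int) (by omega : (0:Int) < m)
          nlinarith [Int.natCast_nonneg (s.drop m.toNat).length]
        rw [PySem.List.pyRange_one_cons (by omega)]
        rw [List.map_cons, List.sum_cons]
        -- head term: s[m-1] = last of first chunk
        have hhead : PySem.List.pyGetD s (1 * m - 1) 0 = (s.take m.toNat).getLastD 0 := by
          rw [getLastD_take s m.toNat hM1 hlt]
          rw [PySem.List.pyGetD_of_nonneg s 0 (by omega)]
          congr 1
          omega
        -- tail: shift the range and the indices
        have htail :
            ((PySem.List.pyRange (1 + 1) (PySem.Int.floordiv ((s.drop m.toNat).length : Int) m + 1 + 1)).map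
              (fun q => PySem.List.pyGetD s (q * m - 1) 0)).sum
            = ((PySem.List.pyRange 1 (PySem.Int.floordiv ((s.drop m.toNat).length : Int) m + 1)).map
              (fun q => PySem.List.pyGetD (s.drop m.toNat) (q * m - 1) 0)).sum := by
          rw [pyRange_map_shift 1 (PySem.Int.floordiv ((s.drop m.toNat).length : Int) m + 1)
            (fun q => PySem.List.pyGetD s (q * m - 1) 0)]
          congr 1
          apply List.map_congr_left
          intro q hq
          have hq1 : 1 ≤ q := (PySem.List.mem_pyRange_one.mp hq).1
          have harg : (q + 1) * m - 1 = (q * m - 1) + (m.toNat : Int) := by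
            rw [hmem]; ring
          rw [harg]
          exact pyGetD_drop s m.toNat (q * m - 1) 0 (by nlinarith)
        rw [htail]
        have hdlen : (s.drop m.toNat).length = n - m.toNat := by simp [hn]
        rw [ih (n - m.toNat) (by omega) (s.drop m.toNat) hdlen]
        -- chunks side
        conv_rhs => rw [chunksF]
        rw [dif_neg (by push_neg; exact ⟨by omega, by omega⟩)]
        rw [List.map_cons, List.sum_cons, hhead]

-- ===== VERDICT (by name: the statement is the Claim_ definition above) =====
theorem solution_spec : Claim_equal_solution := by
  intro k m score _ hpre
  unfold Pre_solution at hpre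
  unfold Spec_solution solution solution_alt
  simp only []
  set s := PySem.List.sorted score (fun x => x) true with hs
  -- reduce A's first loop to a foldl over s
  rw [PySem.List.foldl_pyRange_zero_pyGetD' s 0
    (fun (st : List (List Int) × List Int) x =>
      let ns := st.2 ++ [x]
      if (ns.length : Int) = m then (st.1 ++ [ns], ([] : List Int)) else (st.1, ns))
    ([], [])]
  have hgA : (fun (st : List (List Int) × List Int) x =>
      let ns := st.2 ++ [x]
      if (ns.length : Int) = m then (st.1 ++ [ns], ([] : List Int)) else (st.1, ns)) = gA m := rfl
  rw [hgA]
  -- reduce A's second loop to a foldl over the boxes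
  rw [PySem.List.foldl_pyRange_zero_pyGetD' (s.foldl (gA m) ([], [])).1 ([] : List Int)
    (fun acc b => acc + ((PySem.List.min? b (fun x => x)).getD 0) * m) 0]
  rcases Int.lt_or_le m 0 with hneg | hge
  · -- m < 0: A's boxes stay empty, B's range is empty
    rw [foldA_neg hneg]
    have hb : PySem.Int.floordiv (s.length : Int) m ≤ 0 := by
      have h1 := PySem.Int.floordiv_mul_add_mod (s.length : Int) m
      have h2 := (PySem.Int.mod_neg_bounds (s.length : Int) hneg).1
      have h3 := (PySem.Int.mod_neg_bounds (s.length : Int) hneg).2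
      nlinarith [Int.natCast_nonneg s.length]
    rw [PySem.List.pyRange_one_eq_nil (by omega)]
    simp
  · have hm : 1 ≤ m := by omega
    rw [foldA_chunks hm s.length s rfl []]
    simp only [List.nil_append]
    rw [PySem.List.foldl_add _ (fun b => ((PySem.List.min? b (fun x => x)).getD 0) * m) 0]
    rw [PySem.List.foldl_add _ (fun q => PySem.List.pyGetD s (q * m - 1) 0) 0]
    rw [bsum_chunks hm s.length s rfl]
    simp only [zero_add]
    -- min of each (descending) chunk is its last element
    have hps : s.Pairwise (fun a b => b ≤ a) := PySem.List.sorted_pairwise_rev score (fun x => x)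
    have hcongr : (chunksF m.toNat s).map (fun b => ((PySem.List.min? b (fun x => x)).getD 0) * m)
        = (chunksF m.toNat s).map (fun b => b.getLastD 0 * m) := by
      apply List.map_congr_left
      intro b hb
      obtain ⟨hblen, hbsub⟩ := chunksF_props (by omega) s.length s rfl b hb
      have hbne : b ≠ [] := by intro hc; rw [hc] at hblen; simp at hblen; omega
      rw [minD_desc b hbne (hps.sublist hbsub)]
    rw [hcongr]
    -- Σ (last b * m) = m * Σ last b
    induction (chunksF m.toNat s) with
    | nil => simp
    | cons b t iht =>
        simp only [List.map_cons, List.sum_cons] at *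
        rw [iht]
        ring
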